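-- pv_equiv track=rewrite | github.com/ddzero2c/tmux-easymotion | easymotion.py | generate_smartsign_patterns
-- ===== SOURCE A (Python) =====
-- import itertools
--
-- def generate_smartsign_patterns(
--     pattern,
--     smartsign: bool = False,
--     # Mutable default as "static" variable - created once at function definition
--     _table: dict = {
--         "1": "!",
--         "2": "@",
--         "3": "#",
--         "4": "$",
--         "5": "%",
--         "6": "^",
--         "7": "&",
--         "8": "*",
--         "9": "(",
--         "0": ")",
--         "-": "_",
--         "=": "+",
--         "[": "{",
--         "]": "}",
--         "\\": "|",
--         ";": ":",
--         "'": '"',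
--         "`": "~",
--         ",": "<",
--         ".": ">",
--         "/": "?",
--     },
-- ):
--     """Generate all smartsign variants for ANY pattern
--
--     This is a generic function that works for patterns of any length.
--     Each character position is independently expanded if it has a smartsign mapping.
--     This enables smartsign support for all search modes (s, s2, s3, etc.)
--
--     Args:
--         pattern: String of any length
--         smartsign: Whether smartsign feature is enabled
--
--     Returns:
--         List of pattern variants (includes original pattern)
--
--     Examples:
--         "3" -> ["3", "#"]
--         "3," -> ["3,", "#,", "3<", "#<"]
--         "ab" -> ["ab"]
--         "3x5" -> ["3x5", "#x5", "3x%", "#x%"]  # Future: 3-char support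
--     """
--     if not smartsign:
--         return [pattern]
--
--     # For each character position, collect possible characters
--     char_options = []
--     for ch in pattern:
--         options = [ch]
--         # Add smartsign variant if exists
--         if ch in _table:
--             options.append(_table[ch])
--         char_options.append(options)
--
--     # Generate all combinations (Cartesian product)
--     patterns = ["".join(combo) for combo in itertools.product(*char_options)]
--     return patterns
-- ===== SOURCE B (Python) =====
-- def generate_smartsign_patterns(
--     pattern,
--     smartsign: bool = False,
--     _table: dict = {
--         "1": "!", "2": "@", "3": "#", "4": "$", "5": "%", "6": "^",
--         "7": "&", "8": "*", "9": "(", "0": ")", "-": "_", "=": "+",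
--         "[": "{", "]": "}", "\\": "|", ";": ":", "'": '"', "`": "~",
--         ",": "<", ".": ">", "/": "?",
--     },
-- ):
--     # Bitmask enumeration: with m mapped characters there are exactly 2**m
--     # variants; decode each integer k's bits (MSB = leftmost mapped position,
--     # so the last position varies fastest) into a substitution of pattern.
--     if not smartsign:
--         return [pattern]
--     m = sum(1 for ch in pattern if ch in _table)
--     out = []
--     for k in range(2 ** m):
--         chars = []
--         rem = m
--         for ch in pattern:
--             if ch in _table:
--                 rem = rem - 1
--                 if k >> rem & 1:
--                     chars.append(_table[ch])
--                 else:
--                     chars.append(ch)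
--             else:
--                 chars.append(ch)
--         out.append("".join(chars))
--     return out
-- ===== Notes on version B (the rewrite author's own statement) =====
-- stated objective: alternative
-- what changed: Replaced the per-character option lists + itertools.product with bitmask enumeration: count the m mapped characters, then for each integer k in range(2**m) decode k's bits (MSB = leftmost mapped position) into one substituted copy of the pattern.
import Mathlib
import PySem

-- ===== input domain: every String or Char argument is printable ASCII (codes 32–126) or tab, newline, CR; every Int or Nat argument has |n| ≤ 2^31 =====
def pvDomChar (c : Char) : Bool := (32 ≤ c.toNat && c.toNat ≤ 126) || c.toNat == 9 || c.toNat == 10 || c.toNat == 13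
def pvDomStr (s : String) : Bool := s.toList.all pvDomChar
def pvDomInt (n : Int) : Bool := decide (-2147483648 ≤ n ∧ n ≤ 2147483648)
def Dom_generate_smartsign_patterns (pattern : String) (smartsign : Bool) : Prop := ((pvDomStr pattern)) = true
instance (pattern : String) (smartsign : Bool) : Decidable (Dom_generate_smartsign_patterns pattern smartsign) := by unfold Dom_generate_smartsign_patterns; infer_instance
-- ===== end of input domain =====

-- B replaces A's per-character option lists + itertools.product with bitmask enumeration:
-- count the m mapped characters, then decode each k in range(2**m) into one substituted copy
-- of the pattern (objective: alternative algorithm, same cost).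

-- ===== PORT A =====
-- the _table default parameter of the Python function, shared data of both ports
def pvTable : PySem.Dict Char Char := PySem.Dict.ofList [('1', '!'), ('2', '@'), ('3', '#'), ('4', '$'), ('5', '%'), ('6', '^'), ('7', '&'), ('8', '*'), ('9', '('), ('0', ')'), ('-', '_'), ('=', '+'), ('[', '{'), (']', '}'), ('\\', '|'), (';', ':'), ('\'', '"'), ('`', '~'), (',', '<'), ('.', '>'), ('/', '?')]

-- per-character option list: [ch] plus its smartsign variant if the table has one
def pvOptions (ch : Char) : List Char :=
  ch :: (match PySem.Dict.get? pvTable ch with | some v => [v] | none => [])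

-- itertools.product over lists of chars, in itertools' order (first position slowest)
def pvProduct : List (List Char) → List (List Char)
  | [] => [[]]
  | os :: rest => os.flatMap (fun c => (pvProduct rest).map (fun t => c :: t))

def generate_smartsign_patterns (pattern : String) (smartsign : Bool) : List String :=
  if !smartsign then [pattern]
  else
    let char_options := pattern.toList.foldl (fun acc ch => acc ++ [pvOptions ch]) []
    (pvProduct char_options).map (fun combo => String.ofList combo)

-- ===== PORT B =====
-- transliteration of Source B; 'k >> rem & 1' is ported as '(k >>> rem.toNat) &&& 1' — exact here
-- since rem counts not-yet-consumed mapped characters and is never negative, and likewise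
-- '2 ** m' as '2 ^ m.toNat' with m ≥ 0
def generate_smartsign_patterns_alt (pattern : String) (smartsign : Bool) : List String :=
  if !smartsign then [pattern]
  else
    let m : Int := pattern.toList.foldl
      (fun n ch => if (PySem.Dict.get? pvTable ch).isSome then n + 1 else n) 0
    (PySem.List.pyRange 0 ((2 : Int) ^ m.toNat) 1).foldl
      (fun out (k : Int) =>
        let st := pattern.toList.foldl
          (fun (st : List Char × Int) ch =>
            match PySem.Dict.get? pvTable ch with
            | some v =>
              let rem := st.2 - 1
              if PySem.Int.band (k >>> rem.toNat) 1 ≠ 0 then (st.1 ++ [v], rem)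
              else (st.1 ++ [ch], rem)
            | none => (st.1 ++ [ch], st.2))
          ([], m)
        out ++ [String.ofList st.1])
      []

-- ===== PRECONDITION & SPEC =====
def Spec_generate_smartsign_patterns (pattern : String) (smartsign : Bool) (out : List String) : Prop := out = generate_smartsign_patterns_alt pattern smartsign
instance (pattern : String) (smartsign : Bool) (out : List String) : Decidable (Spec_generate_smartsign_patterns pattern smartsign out) := by unfold Spec_generate_smartsign_patterns; infer_instance

-- ===== CLAIM (what is proved, stated in full; the proofs are below) =====
def Claim_equal_generate_smartsign_patterns : Prop := ∀ (pattern : String) (smartsign : Bool), Dom_generate_smartsign_patterns pattern smartsign → Spec_generate_smartsign_patterns pattern smartsign (generate_smartsign_patterns pattern smartsign)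

-- ===== LEMMAS AND PROOFS =====

-- number of mapped characters
def pvCnt (cs : List Char) : Nat := cs.countP (fun ch => (PySem.Dict.get? pvTable ch).isSome)

-- the substitution B's inner loop computes, as structural recursion on the pattern (Nat mask)
def pvBuild : List Char → Nat → List Char
  | [], _ => []
  | ch :: rest, k =>
    match PySem.Dict.get? pvTable ch with
    | some v => (if (k >>> pvCnt rest) % 2 = 1 then v else ch) :: pvBuild rest k
    | none => ch :: pvBuild rest k

-- Python truthiness of 'k >> c & 1' as a parity test on the Nat mask
theorem pv_bit (kn c : Nat) : (PySem.Int.band ((kn : Int) >>> c) 1 ≠ 0) ↔ (kn >>> c) % 2 = 1 := by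
  rw [← Int.natCast_shiftRight]
  have h1 : PySem.Int.band ((kn >>> c : Nat) : Int) 1 = ((kn >>> c) &&& 1 : Nat) := by
    exact_mod_cast PySem.Int.band_natCast (kn >>> c) 1
  rw [h1, Nat.and_one_is_mod]
  omega

-- B's inner fold equals pvBuild (the second component tracks pvCnt of the remaining suffix)
theorem pv_fold_eq_build (kn : Nat) (cs : List Char) (s : List Char) :
    (cs.foldl
      (fun (st : List Char × Int) ch =>
        match PySem.Dict.get? pvTable ch with
        | some v =>
          let rem := st.2 - 1
          if PySem.Int.band ((kn : Int) >>> rem.toNat) 1 ≠ 0 then (st.1 ++ [v], rem)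
          else (st.1 ++ [ch], rem)
        | none => (st.1 ++ [ch], st.2))
      (s, (pvCnt cs : Int))).1
    = s ++ pvBuild cs kn := by
  induction cs generalizing s with
  | nil => simp [pvBuild]
  | cons ch rest ih =>
    simp only [List.foldl_cons]
    cases h : PySem.Dict.get? pvTable ch with
    | none =>
      have hc : pvCnt (ch :: rest) = pvCnt rest := by simp [pvCnt, h]
      simp only [hc]
      rw [ih]
      simp [pvBuild, h]
    | some v =>
      have hc : ((pvCnt (ch :: rest) : Int) - 1) = (pvCnt rest : Int) := by
        simp [pvCnt, h]
      simp only [hc]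
      by_cases hb : PySem.Int.band ((kn : Int) >>> ((pvCnt rest : Int)).toNat) 1 ≠ 0
      · simp only [Int.toNat_natCast] at *
        rw [if_pos hb, ih]
        have hbit : (kn >>> pvCnt rest) % 2 = 1 := (pv_bit kn (pvCnt rest)).mp (by simpa using hb)
        simp [pvBuild, h, hbit]
      · rw [if_neg hb, ih]
        have hbit : ¬ (kn >>> pvCnt rest) % 2 = 1 := by
          intro hx
          exact hb ((pv_bit kn (pvCnt rest)).mpr (by simpa using hx))
        simp [pvBuild, h, hbit]

-- adding a bit at or above position j does not change any bit below j
theorem pv_shift_parity (j r k : Nat) (hr : r < j) :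
    ((2 ^ j + k) >>> r) % 2 = (k >>> r) % 2 := by
  have h2 : 2 ^ j = 2 ^ r * (2 * 2 ^ (j - r - 1)) := by
    rw [← pow_succ']
    rw [← pow_add]
    congr 1
    omega
  rw [Nat.shiftRight_eq_div_pow, Nat.shiftRight_eq_div_pow, h2,
    Nat.mul_add_div (Nat.pow_pos (by omega : 0 < 2))]
  omega

-- pvBuild ignores bits at or above pvCnt cs
theorem pv_build_high_bit (cs : List Char) (j k : Nat) (hj : pvCnt cs ≤ j) (_hk : k < 2 ^ j) :
    pvBuild cs (2 ^ j + k) = pvBuild cs k := by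
  induction cs with
  | nil => rfl
  | cons ch rest ih =>
    cases h : PySem.Dict.get? pvTable ch with
    | none =>
      have hc : pvCnt (ch :: rest) = pvCnt rest := by simp [pvCnt, h]
      simp only [pvBuild, h]
      rw [ih (by omega)]
    | some v =>
      have hc : pvCnt (ch :: rest) = pvCnt rest + 1 := by simp [pvCnt, h]
      have hr : pvCnt rest < j := by omega
      simp only [pvBuild, h]
      rw [ih (by omega), pv_shift_parity j (pvCnt rest) k hr]

-- A's Cartesian product enumerates exactly the bitmask substitutions, in the same order
theorem pv_product_eq_range (cs : List Char) :
    pvProduct (cs.map pvOptions) = (List.range (2 ^ pvCnt cs)).map (pvBuild cs) := by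
  induction cs with
  | nil => rfl
  | cons ch rest ih =>
    cases h : PySem.Dict.get? pvTable ch with
    | none =>
      have hc : pvCnt (ch :: rest) = pvCnt rest := by simp [pvCnt, h]
      simp only [List.map_cons, pvProduct, pvOptions, h, ih, hc, List.flatMap_cons,
        List.flatMap_nil, List.append_nil, List.map_map]
      refine List.map_congr_left (fun k _hk => ?_)
      simp [pvBuild, h]
    | some v =>
      have hc : pvCnt (ch :: rest) = pvCnt rest + 1 := by simp [pvCnt, h]
      have hsplit : 2 ^ (pvCnt rest + 1) = 2 ^ pvCnt rest + 2 ^ pvCnt rest := by ring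
      simp only [List.map_cons, pvProduct, pvOptions, h, ih, hc, List.flatMap_cons,
        List.flatMap_nil, List.append_nil, List.map_map, hsplit, List.range_add,
        List.map_append]
      congr 1
      · refine List.map_congr_left (fun k hk => ?_)
        have hk' : k < 2 ^ pvCnt rest := List.mem_range.mp hk
        have h0 : (k >>> pvCnt rest) % 2 = 0 := by
          rw [Nat.shiftRight_eq_div_pow, Nat.div_eq_of_lt hk']
        simp [pvBuild, h, h0]
      · refine List.map_congr_left (fun k hk => ?_)
        have hk' : k < 2 ^ pvCnt rest := List.mem_range.mp hk
        have h1 : ((2 ^ pvCnt rest + k) >>> pvCnt rest) % 2 = 1 := by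
          rw [Nat.shiftRight_eq_div_pow, Nat.add_div_left _ (Nat.pow_pos (by omega : 0 < 2)),
            Nat.div_eq_of_lt hk']
        simp [pvBuild, h, h1, pv_build_high_bit rest (pvCnt rest) k (le_refl _) hk']

-- ===== VERDICT (by name: the statement is the Claim_ definition above) =====
theorem generate_smartsign_patterns_spec : Claim_equal_generate_smartsign_patterns := by
  intro pattern smartsign _
  unfold Spec_generate_smartsign_patterns generate_smartsign_patterns generate_smartsign_patterns_alt
  cases smartsign with
  | false => rfl
  | true =>
    simp only [Bool.not_true, Bool.false_eq_true, if_false]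
    -- A side: the option-list accumulation is a map
    rw [PySem.List.foldl_append_singleton_eq_map pvOptions pattern.toList []]
    simp only [List.nil_append]
    rw [pv_product_eq_range]
    -- B side: the mapped-character count
    have hm : pattern.toList.foldl
        (fun n ch => if (PySem.Dict.get? pvTable ch).isSome then n + 1 else n) 0
        = (pvCnt pattern.toList : Int) := by
      simpa [pvCnt] using
        PySem.List.foldl_count_if (fun ch => (PySem.Dict.get? pvTable ch).isSome) pattern.toList 0
    rw [hm]
    simp only [Int.toNat_natCast]
    have hc : ((2 : Int) ^ pvCnt pattern.toList) = ((2 ^ pvCnt pattern.toList : Nat) : Int) := by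
      push_cast; ring
    rw [hc, PySem.List.pyRange_zero_nat]
    rw [List.foldl_map]
    rw [PySem.List.foldl_append_singleton_eq_map _ (List.range (2 ^ pvCnt pattern.toList)) []]
    simp only [List.nil_append, List.map_map]
    refine List.map_congr_left (fun k _ => ?_)
    rw [pv_fold_eq_build k pattern.toList []]
    simp
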